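-- pv_equiv track=rewrite | github.com/gurramdikshareddy/LeetCode | Medium/2560. House Robber IV/python3.py | canStealKHouses
-- ===== SOURCE A (Python) =====
-- def canStealKHouses(nums, k, capability):
--     count = 0
--     i = 0
--     while i < len(nums):
--         if nums[i] <= capability:
--             count += 1
--             i += 2
--         else:
--             i += 1
--     return count >= k
-- ===== SOURCE B (Python) =====
-- def canStealKHouses(nums, k, capability):
--     # Two-state DP over the houses: skip = best count with current house free,
--     # take = best count with the current house taken (0 when it cannot be taken).
--     skip = 0
--     take = 0
--     for x in nums:
--         skip, take = max(skip, take), (skip + 1 if x <= capability else 0)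
--     return max(skip, take) >= k
-- ===== Notes on version B (the rewrite author's own statement) =====
-- stated objective: alternative
-- what changed: Replaces the leftmost-greedy index loop (taking an eligible house and jumping two positions) with a two-state dynamic program (skip/take) that folds once over the list and compares the maximum against k.
import Mathlib
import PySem

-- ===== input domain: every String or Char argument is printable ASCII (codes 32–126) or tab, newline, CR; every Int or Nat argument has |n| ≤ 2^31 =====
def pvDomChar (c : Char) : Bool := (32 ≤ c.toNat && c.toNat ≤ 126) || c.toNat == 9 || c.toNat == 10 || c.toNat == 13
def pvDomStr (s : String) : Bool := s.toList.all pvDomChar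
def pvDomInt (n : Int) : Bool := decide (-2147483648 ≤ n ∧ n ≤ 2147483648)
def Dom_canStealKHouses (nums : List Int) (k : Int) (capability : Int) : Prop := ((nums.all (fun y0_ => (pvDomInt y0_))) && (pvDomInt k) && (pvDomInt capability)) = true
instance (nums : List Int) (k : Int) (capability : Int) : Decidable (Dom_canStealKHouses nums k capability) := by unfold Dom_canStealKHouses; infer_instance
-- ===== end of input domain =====

-- B replaces A's leftmost-greedy index loop with a two-state skip/take DP fold; alternative, same cost.

-- ===== PORT A =====
-- A's while loop over index i, advancing by 2 after a take and by 1 otherwise.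
def canStealKHousesLoop (nums : List Int) (capability : Int) (count : Int) (i : Nat) : Int :=
  if h : i < nums.length then
    if nums[i] ≤ capability then canStealKHousesLoop nums capability (count + 1) (i + 2)
    else canStealKHousesLoop nums capability count (i + 1)
  else count
termination_by nums.length - i

def canStealKHouses (nums : List Int) (k : Int) (capability : Int) : Bool :=
  decide (k ≤ canStealKHousesLoop nums capability 0 0)

-- ===== PORT B =====
def canStealKHouses_alt (nums : List Int) (k : Int) (capability : Int) : Bool :=
  let st := nums.foldl (fun (p : Int × Int) x => (max p.1 p.2, if x ≤ capability then p.1 + 1 else 0)) (0, 0)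
  decide (k ≤ max st.1 st.2)

-- ===== PRECONDITION & SPEC =====
def Spec_canStealKHouses (nums : List Int) (k : Int) (capability : Int) (out : Bool) : Prop := out = canStealKHouses_alt nums k capability
instance (nums : List Int) (k : Int) (capability : Int) (out : Bool) : Decidable (Spec_canStealKHouses nums k capability out) := by unfold Spec_canStealKHouses; infer_instance

-- ===== CLAIM (what is proved, stated in full; the proofs are below) =====
def Claim_equal_canStealKHouses : Prop := ∀ (nums : List Int) (k : Int) (capability : Int), Dom_canStealKHouses nums k capability → Spec_canStealKHouses nums k capability (canStealKHouses nums k capability)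

-- ===== LEMMAS AND PROOFS =====

-- the true maximum number of non-adjacent eligible houses
def mHouses (capability : Int) : List Int → Int
  | [] => 0
  | x :: xs =>
    if x ≤ capability then max (1 + mHouses capability xs.tail) (mHouses capability xs)
    else mHouses capability xs
termination_by xs => xs.length
decreasing_by all_goals (simp; try omega)

-- A's greedy, expressed structurally on the list
def gHouses (capability : Int) : List Int → Int
  | [] => 0
  | x :: xs =>
    if x ≤ capability then 1 + gHouses capability xs.tail
    else gHouses capability xs
termination_by xs => xs.length
decreasing_by all_goals (simp; try omega)

theorem mHouses_nonneg (c : Int) (xs : List Int) : 0 ≤ mHouses c xs := by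
  induction xs using mHouses.induct c with
  | case1 => simp [mHouses]
  | case2 x xs hx ih1 ih2 => simp only [mHouses, if_pos hx]; omega
  | case3 x xs hx ih => simp only [mHouses, if_neg hx]; exact ih

theorem mHouses_le_cons (c : Int) (x : Int) (xs : List Int) :
    mHouses c xs ≤ mHouses c (x :: xs) := by
  by_cases hx : x ≤ c
  · simp only [mHouses, if_pos hx]; omega
  · simp only [mHouses, if_neg hx]; exact le_rfl

theorem mHouses_tail_le (c : Int) (xs : List Int) :
    mHouses c xs.tail ≤ mHouses c xs := by
  cases xs with
  | nil => simp
  | cons y ys => simpa using mHouses_le_cons c y ys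

theorem mHouses_cons_le (c : Int) (x : Int) (xs : List Int) :
    mHouses c (x :: xs) ≤ 1 + mHouses c xs := by
  have h := mHouses_tail_le c xs
  by_cases hx : x ≤ c
  · simp only [mHouses, if_pos hx]; omega
  · simp only [mHouses, if_neg hx]; omega

theorem mHouses_le_one_add_tail (c : Int) (xs : List Int) :
    mHouses c xs ≤ 1 + mHouses c xs.tail := by
  cases xs with
  | nil => simp [mHouses]
  | cons y ys => simpa using mHouses_cons_le c y ys

theorem gHouses_eq_mHouses (c : Int) (xs : List Int) :
    gHouses c xs = mHouses c xs := by
  induction xs using gHouses.induct c with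
  | case1 => simp [gHouses, mHouses]
  | case2 x xs hx ih =>
    have h1 := mHouses_le_one_add_tail c xs
    simp only [gHouses, if_pos hx, mHouses, ih]
    omega
  | case3 x xs hx ih => simp only [gHouses, if_neg hx, mHouses, ih]

theorem canStealKHousesLoop_eq (nums : List Int) (c : Int) (count : Int) (i : Nat) :
    canStealKHousesLoop nums c count i = count + gHouses c (nums.drop i) := by
  induction count, i using canStealKHousesLoop.induct nums c with
  | case1 count i h hx ih =>
    rw [canStealKHousesLoop]
    have hd : nums.drop i = nums[i] :: nums.drop (i + 1) := List.drop_eq_getElem_cons h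
    have hdd : List.drop (i + 1 + 1) nums = List.drop (i + 2) nums := rfl
    rw [dif_pos h, if_pos hx, ih, hd]
    simp only [gHouses, if_pos hx, List.tail_drop, hdd]
    omega
  | case2 count i h hx ih =>
    rw [canStealKHousesLoop]
    have hd : nums.drop i = nums[i] :: nums.drop (i + 1) := List.drop_eq_getElem_cons h
    rw [dif_pos h, if_neg hx, ih, hd]
    simp only [gHouses, if_neg hx]
  | case3 count i h =>
    rw [canStealKHousesLoop]
    have hnil : nums.drop i = [] := List.drop_eq_nil_of_le (by omega)
    rw [dif_neg h, hnil]
    simp [gHouses]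

theorem foldDP_eq (c : Int) (xs : List Int) : ∀ s t : Int, 0 ≤ s → 0 ≤ t →
    max (xs.foldl (fun (p : Int × Int) x => (max p.1 p.2, if x ≤ c then p.1 + 1 else 0)) (s, t)).1
        (xs.foldl (fun (p : Int × Int) x => (max p.1 p.2, if x ≤ c then p.1 + 1 else 0)) (s, t)).2
      = max (s + mHouses c xs) (t + mHouses c xs.tail) := by
  induction xs with
  | nil => intro s t hs ht; simp [mHouses]
  | cons x xs ih =>
    intro s t hs ht
    have htail := mHouses_tail_le c xs
    have hm := mHouses_nonneg c xs
    by_cases hx : x ≤ c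
    · rw [List.foldl_cons]
      simp only [if_pos hx]
      rw [ih (max s t) (s + 1) (by omega) (by omega)]
      simp only [mHouses, if_pos hx, List.tail_cons]
      omega
    · rw [List.foldl_cons]
      simp only [if_neg hx]
      rw [ih (max s t) 0 (by omega) le_rfl]
      simp only [mHouses, if_neg hx, List.tail_cons]
      omega

-- ===== VERDICT (by name: the statement is the Claim_ definition above) =====
theorem canStealKHouses_spec : Claim_equal_canStealKHouses := by
  intro nums k capability _
  unfold Spec_canStealKHouses
  simp only [canStealKHouses, canStealKHouses_alt]
  have hA := canStealKHousesLoop_eq nums capability 0 0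
  rw [List.drop_zero] at hA
  have hB := foldDP_eq capability nums 0 0 le_rfl le_rfl
  have htail := mHouses_tail_le capability nums
  rw [hA, gHouses_eq_mHouses, hB]
  have heq : max (0 + mHouses capability nums) (0 + mHouses capability nums.tail)
      = 0 + mHouses capability nums := by omega
  rw [heq]
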